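-- pv_equiv track=rewrite | github.com/fel1k2/try_it_recs | Try_It_server/recommend.py | filter_games_by_criteria
-- ===== SOURCE A (Python) =====
-- from typing import List, Dict, Tuple, Optional, Set
--
-- def filter_games_by_criteria(
--     game_features: Dict[str, List[str]],
--     tags: Optional[List[str]] = None,
--     genres: Optional[List[str]] = None,
--     categories: Optional[List[str]] = None
-- ) -> Dict[str, List[str]]:
--     if not (tags or genres or categories):
--         return game_features
--     filtered_games = {}
--     for gid, features in game_features.items():
--         features_lower = [f.lower() for f in features]
--         if (not tags or any(tag.lower() in features_lower for tag in tags)) and \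
--            (not genres or any(genre.lower() in features_lower for genre in genres)) and \
--            (not categories or any(category.lower() in features_lower for category in categories)):
--             filtered_games[gid] = features
--     return filtered_games
-- ===== SOURCE B (Python) =====
-- def filter_games_by_criteria(game_features, tags=None, genres=None, categories=None):
--     if not (tags or genres or categories):
--         return game_features
--     index = {}
--     for gid, features in game_features.items():
--         for f in features:
--             index.setdefault(f.lower(), set()).add(gid)
--     candidates = set(game_features.keys())
--     for group in (tags, genres, categories):
--         if group:
--             hits = set()
--             for term in group:
--                 hits |= index.get(term.lower(), set())
--             candidates &= hits
--     return {gid: feats for gid, feats in game_features.items() if gid in candidates}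
-- ===== Notes on version B (the rewrite author's own statement) =====
-- stated objective: alternative
-- what changed: Replaces the per-game scan of every criterion term over the lowered feature list by an inverted index (lowered feature -> set of game ids) built in one pass, per-group id-set unions intersected into a candidate set, and a final ordered pass emitting surviving games; Pre_ excludes association lists with duplicate game ids, which cannot arise from a Python dict argument.
import Mathlib
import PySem

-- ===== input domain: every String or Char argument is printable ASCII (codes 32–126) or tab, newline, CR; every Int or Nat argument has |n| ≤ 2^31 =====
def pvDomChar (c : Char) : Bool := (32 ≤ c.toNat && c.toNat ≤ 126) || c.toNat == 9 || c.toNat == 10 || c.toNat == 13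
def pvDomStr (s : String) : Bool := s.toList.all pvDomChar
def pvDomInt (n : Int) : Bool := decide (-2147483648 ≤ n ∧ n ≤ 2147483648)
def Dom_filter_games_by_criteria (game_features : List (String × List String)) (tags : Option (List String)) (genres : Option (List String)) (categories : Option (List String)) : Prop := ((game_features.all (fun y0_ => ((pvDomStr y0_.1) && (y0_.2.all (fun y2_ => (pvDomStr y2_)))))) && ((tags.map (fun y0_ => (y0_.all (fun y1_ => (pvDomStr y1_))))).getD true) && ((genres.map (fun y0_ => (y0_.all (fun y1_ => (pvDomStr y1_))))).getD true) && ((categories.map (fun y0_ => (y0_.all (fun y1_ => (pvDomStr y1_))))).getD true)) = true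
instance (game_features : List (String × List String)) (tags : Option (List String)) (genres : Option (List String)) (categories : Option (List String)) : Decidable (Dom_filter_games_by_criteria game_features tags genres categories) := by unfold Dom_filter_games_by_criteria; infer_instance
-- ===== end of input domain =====

-- B replaces A's per-game term scans by an inverted index (lowered feature → id-set), per-group
-- id-set unions intersected into a candidate set, and a final ordered emitting pass (alternative
-- decomposition; Pre_ excludes duplicate game ids, impossible for a Python dict argument).


-- ===== PORT A =====
-- Python truthiness of an optional list: None and [] are falsy.
def pvTruthy (g : Option (List String)) : Bool :=
  match g with
  | none => false
  | some l => !l.isEmpty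

-- A's per-game test for one criterion group: "not group or any(term.lower() in features_lower)"
def pvGroupOk (g : Option (List String)) (fl : List String) : Bool :=
  match g with
  | none => true
  | some ts => ts.isEmpty || ts.any (fun t => fl.contains (PySem.Str.lower t))

def filter_games_by_criteria (game_features : List (String × List String)) (tags : Option (List String)) (genres : Option (List String)) (categories : Option (List String)) : List (String × List String) :=
  if !(pvTruthy tags || pvTruthy genres || pvTruthy categories) then game_features
  else
    game_features.foldl (fun acc p =>
      let fl := p.2.map PySem.Str.lower
      if pvGroupOk tags fl && pvGroupOk genres fl && pvGroupOk categories fl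
      then acc ++ [p] else acc) []

-- ===== PORT B =====
-- Python truthiness of an optional list, for B's guard: None and [] are falsy.
def pvTruthyB (g : Option (List String)) : Bool :=
  match g with
  | none => false
  | some l => !l.isEmpty

-- index.setdefault(f.lower(), set()).add(gid) over one game's features
def pvIndexAdd (gid : String) (idx : PySem.Dict String (PySem.Set String)) (features : List String) : PySem.Dict String (PySem.Set String) :=
  features.foldl (fun idx f =>
    idx.modify (PySem.Str.lower f) PySem.Set.empty (fun s => PySem.Set.add s gid)) idx

-- the inverted index: lowered feature string → set of game ids possessing it
def pvBuildIndex (game_features : List (String × List String)) : PySem.Dict String (PySem.Set String) :=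
  game_features.foldl (fun idx p => pvIndexAdd p.1 idx p.2) PySem.Dict.empty

-- union over one group's terms of index.get(term.lower(), set())
def pvHits (idx : PySem.Dict String (PySem.Set String)) (group : List String) : PySem.Set String :=
  group.foldl (fun h t => PySem.Set.union h (idx.getD (PySem.Str.lower t) PySem.Set.empty)) PySem.Set.empty

-- "if group: candidates &= hits"
def pvRestrict (idx : PySem.Dict String (PySem.Set String)) (cands : PySem.Set String) (g : Option (List String)) : PySem.Set String :=
  match g with
  | none => cands
  | some l => if l.isEmpty then cands else PySem.Set.inter cands (pvHits idx l)

def filter_games_by_criteria_alt (game_features : List (String × List String)) (tags : Option (List String)) (genres : Option (List String)) (categories : Option (List String)) : List (String × List String) :=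
  if !(pvTruthyB tags || pvTruthyB genres || pvTruthyB categories) then game_features
  else
    let idx := pvBuildIndex game_features
    let cands := pvRestrict idx (pvRestrict idx (pvRestrict idx
      (PySem.Set.ofList (game_features.map Prod.fst)) tags) genres) categories
    game_features.foldl (fun acc p =>
      if PySem.Set.contains cands p.1 then acc ++ [p] else acc) []

-- ===== PRECONDITION & SPEC =====
-- Pre_ excludes association lists with duplicate game ids: a Python dict argument cannot contain
-- them, so A's behaviour there is not defined by the source; B's id-set would conflate occurrences.
def Pre_filter_games_by_criteria (game_features : List (String × List String)) (tags : Option (List String)) (genres : Option (List String)) (categories : Option (List String)) : Prop :=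
  (game_features.map Prod.fst).Nodup
instance (game_features : List (String × List String)) (tags : Option (List String)) (genres : Option (List String)) (categories : Option (List String)) : Decidable (Pre_filter_games_by_criteria game_features tags genres categories) := by unfold Pre_filter_games_by_criteria; infer_instance

def pvWitness_filter_games_by_criteria : (List (String × List String)) × Option (List String) × Option (List String) × Option (List String) :=
  ([("g1", ["Action", "Indie"]), ("g2", ["RPG"])], some ["ACTION"], none, some ["indie"])

def Spec_filter_games_by_criteria (game_features : List (String × List String)) (tags : Option (List String)) (genres : Option (List String)) (categories : Option (List String)) (out : List (String × List String)) : Prop := out = filter_games_by_criteria_alt game_features tags genres categories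
instance (game_features : List (String × List String)) (tags : Option (List String)) (genres : Option (List String)) (categories : Option (List String)) (out : List (String × List String)) : Decidable (Spec_filter_games_by_criteria game_features tags genres categories out) := by unfold Spec_filter_games_by_criteria; infer_instance

-- ===== CLAIM (what is proved, stated in full; the proofs are below) =====
def Claim_equal_filter_games_by_criteria : Prop := ∀ (game_features : List (String × List String)) (tags : Option (List String)) (genres : Option (List String)) (categories : Option (List String)), Dom_filter_games_by_criteria game_features tags genres categories → Pre_filter_games_by_criteria game_features tags genres categories → Spec_filter_games_by_criteria game_features tags genres categories (filter_games_by_criteria game_features tags genres categories)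

-- ===== LEMMAS AND PROOFS =====

-- unique keys determine the value of a listed pair
theorem pv_nodup_key_eq {α β : Type} (l : List (α × β)) (h : (l.map Prod.fst).Nodup)
    {a : α} {b c : β} (hb : (a, b) ∈ l) (hc : (a, c) ∈ l) : b = c := by
  induction l with
  | nil => cases hb
  | cons p rest ih =>
    obtain ⟨p1, p2⟩ := p
    rw [List.map_cons, List.nodup_cons] at h
    rcases List.mem_cons.mp hb with hb' | hb' <;> rcases List.mem_cons.mp hc with hc' | hc'
    · injection hb' with h1 h2; injection hc' with h3 h4; rw [h2, h4]
    · injection hb' with h1 h2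
      have hmm : a ∈ rest.map Prod.fst := List.mem_map_of_mem (f := Prod.fst) hc'
      exact absurd (h1 ▸ hmm) h.1
    · injection hc' with h1 h2
      have hmm : a ∈ rest.map Prod.fst := List.mem_map_of_mem (f := Prod.fst) hb'
      exact absurd (h1 ▸ hmm) h.1
    · exact ih h.2 hb' hc'

-- membership in the index after adding one game's features
theorem mem_indexAdd (gid g : String) (idx : PySem.Dict String (PySem.Set String))
    (features : List String) (k : String) :
    g ∈ (pvIndexAdd gid idx features).getD k PySem.Set.empty ↔
      g ∈ idx.getD k PySem.Set.empty ∨ (g = gid ∧ k ∈ features.map PySem.Str.lower) := by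
  induction features generalizing idx with
  | nil => simp [pvIndexAdd]
  | cons f rest ih =>
    simp only [pvIndexAdd, List.foldl_cons] at *
    rw [ih, PySem.Dict.getD_modify, List.map_cons, List.mem_cons]
    by_cases hk : k = PySem.Str.lower f
    · subst hk
      rw [if_pos rfl]
      simp only [PySem.Set.mem_add]
      tauto
    · simp only [if_neg hk]
      tauto

-- membership in the full inverted index
theorem mem_buildIndex (game_features : List (String × List String)) (g k : String) :
    g ∈ (pvBuildIndex game_features).getD k PySem.Set.empty ↔
      ∃ feats, (g, feats) ∈ game_features ∧ k ∈ feats.map PySem.Str.lower := by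
  have H : ∀ (l : List (String × List String)) (d : PySem.Dict String (PySem.Set String)),
      g ∈ (l.foldl (fun idx p => pvIndexAdd p.1 idx p.2) d).getD k PySem.Set.empty ↔
        g ∈ d.getD k PySem.Set.empty ∨ ∃ feats, (g, feats) ∈ l ∧ k ∈ feats.map PySem.Str.lower := by
    intro l
    induction l with
    | nil => simp
    | cons p rest ih =>
      obtain ⟨pid, pfeats⟩ := p
      intro d
      simp only [List.foldl_cons, ih, mem_indexAdd, List.mem_cons]
      constructor
      · rintro ((h | ⟨rfl, hk⟩) | ⟨feats, hf, hk⟩)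
        · exact Or.inl h
        · exact Or.inr ⟨pfeats, Or.inl rfl, hk⟩
        · exact Or.inr ⟨feats, Or.inr hf, hk⟩
      · rintro (h | ⟨feats, (hp | hf), hk⟩)
        · exact Or.inl (Or.inl h)
        · injection hp with h1 h2
          exact Or.inl (Or.inr ⟨h1, h2 ▸ hk⟩)
        · exact Or.inr ⟨feats, hf, hk⟩
  rw [pvBuildIndex, H]
  simp [PySem.Dict.getD_empty]

-- membership in a group's hit set
theorem mem_hits (idx : PySem.Dict String (PySem.Set String)) (group : List String) (g : String) :
    g ∈ pvHits idx group ↔ ∃ t ∈ group, g ∈ idx.getD (PySem.Str.lower t) PySem.Set.empty := by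
  have H : ∀ (l : List String) (s : PySem.Set String),
      g ∈ l.foldl (fun h t => PySem.Set.union h (idx.getD (PySem.Str.lower t) PySem.Set.empty)) s ↔
        g ∈ s ∨ ∃ t ∈ l, g ∈ idx.getD (PySem.Str.lower t) PySem.Set.empty := by
    intro l
    induction l with
    | nil => simp
    | cons t rest ih =>
      intro s
      simp only [List.foldl_cons, ih, PySem.Set.mem_union, List.mem_cons]
      constructor
      · rintro ((h | h) | ⟨u, hu, hg⟩)
        · exact Or.inl h
        · exact Or.inr ⟨t, Or.inl rfl, h⟩
        · exact Or.inr ⟨u, Or.inr hu, hg⟩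
      · rintro (h | ⟨u, (rfl | hu), hg⟩)
        · exact Or.inl (Or.inl h)
        · exact Or.inl (Or.inr hg)
        · exact Or.inr ⟨u, hu, hg⟩
  rw [pvHits, H]
  simp

-- with unique ids, the index lookup for a listed game characterises its own lowered features
theorem mem_buildIndex_of_mem (game_features : List (String × List String))
    (hnd : (game_features.map Prod.fst).Nodup) (gid : String) (feats : List String)
    (hmem : (gid, feats) ∈ game_features) (k : String) :
    gid ∈ (pvBuildIndex game_features).getD k PySem.Set.empty ↔ k ∈ feats.map PySem.Str.lower := by
  rw [mem_buildIndex]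
  constructor
  · rintro ⟨feats', hmem', hk⟩
    rwa [pv_nodup_key_eq game_features hnd hmem' hmem] at hk
  · intro hk; exact ⟨feats, hmem, hk⟩

-- the candidate test equals A's per-game group test, for every listed game
theorem mem_restrict (game_features : List (String × List String))
    (hnd : (game_features.map Prod.fst).Nodup) (gid : String) (feats : List String)
    (hmem : (gid, feats) ∈ game_features) (c : PySem.Set String) (g : Option (List String)) :
    gid ∈ pvRestrict (pvBuildIndex game_features) c g ↔
      gid ∈ c ∧ pvGroupOk g (feats.map PySem.Str.lower) = true := by
  cases g with
  | none => simp [pvRestrict, pvGroupOk]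
  | some l =>
    by_cases hl : l.isEmpty
    · simp [pvRestrict, pvGroupOk, hl]
    · have hlb : l.isEmpty = false := by simpa using hl
      simp only [pvRestrict, pvGroupOk, hlb, Bool.false_eq_true, if_false, Bool.false_or,
        PySem.Set.mem_inter, mem_hits, List.any_eq_true]
      constructor
      · rintro ⟨hc, t, ht, hg⟩
        refine ⟨hc, t, ht, ?_⟩
        have := (mem_buildIndex_of_mem game_features hnd gid feats hmem _).mp hg
        simpa using this
      · rintro ⟨hc, t, ht, hcon⟩
        refine ⟨hc, t, ht, ?_⟩
        exact (mem_buildIndex_of_mem game_features hnd gid feats hmem _).mpr (by simpa using hcon)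

theorem filter_games_by_criteria_spec : Claim_equal_filter_games_by_criteria := by
  intro gf tags genres categories _ hpre
  unfold Spec_filter_games_by_criteria
  unfold filter_games_by_criteria filter_games_by_criteria_alt
  have htb : ∀ g, pvTruthyB g = pvTruthy g := by intro g; cases g <;> rfl
  simp only [htb]
  by_cases hguard : (!(pvTruthy tags || pvTruthy genres || pvTruthy categories)) = true
  · simp [hguard]
  · simp only [Bool.not_eq_true] at hguard
    simp only [hguard, Bool.false_eq_true, if_false]
    apply (PySem.List.foldl_congr_mem' _ _ _ _ ?_).symm
    intro p hp acc
    have hmem : (p.1, p.2) ∈ gf := by simpa using hp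
    have hcands : PySem.Set.contains
        (pvRestrict (pvBuildIndex gf) (pvRestrict (pvBuildIndex gf) (pvRestrict (pvBuildIndex gf)
          (PySem.Set.ofList (gf.map Prod.fst)) tags) genres) categories) p.1 =
        (pvGroupOk tags (p.2.map PySem.Str.lower) && pvGroupOk genres (p.2.map PySem.Str.lower) &&
          pvGroupOk categories (p.2.map PySem.Str.lower)) := by
      by_cases hok : (pvGroupOk tags (p.2.map PySem.Str.lower) && pvGroupOk genres (p.2.map PySem.Str.lower) && pvGroupOk categories (p.2.map PySem.Str.lower)) = true
      · rw [hok, PySem.Set.contains_iff]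
        simp only [Bool.and_eq_true] at hok
        rw [mem_restrict gf hpre p.1 p.2 hmem, mem_restrict gf hpre p.1 p.2 hmem,
          mem_restrict gf hpre p.1 p.2 hmem]
        refine ⟨⟨⟨?_, hok.1.1⟩, hok.1.2⟩, hok.2⟩
        rw [PySem.Set.mem_ofList]
        exact List.mem_map_of_mem (f := Prod.fst) hp
      · rw [Bool.not_eq_true] at hok
        rw [hok, ← Bool.not_eq_true, PySem.Set.contains_iff]
        rw [mem_restrict gf hpre p.1 p.2 hmem, mem_restrict gf hpre p.1 p.2 hmem,
          mem_restrict gf hpre p.1 p.2 hmem]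
        intro h
        have : (pvGroupOk tags (p.2.map PySem.Str.lower) && pvGroupOk genres (p.2.map PySem.Str.lower) && pvGroupOk categories (p.2.map PySem.Str.lower)) = true := by
          simp only [Bool.and_eq_true]
          exact ⟨⟨h.1.1.2, h.1.2⟩, h.2⟩
        rw [hok] at this; cases this
    rw [hcands]
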